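-- pv_equiv track=rewrite | github.com/taichi6930/atcoder | _archive/coderbyte_a.py | solve
-- ===== SOURCE A (Python) =====
-- def solve(paths: list[str]) -> list[int]:
--     # dicはディレクトリ構造を保持する辞書型
--     dic = {}
--     ans = []
--     for path in paths:
--         k = 0
--         # パスをスラッシュで分割
--         splited_paths = path.split("/")
--         # aはdicの参照コピー
--         temp_dic = dic
--         for splited_path in splited_paths:
--             # ディレクトリが存在するかを確認
--             if splited_path in temp_dic:
--                 temp_dic = temp_dic[splited_path]
--                 continue
--             # ディレクトリが存在しない場合、新しいディレクトリを作成
--             k += 1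
--             temp_dic[splited_path] = {}
--             temp_dic = temp_dic[splited_path]
--         ans.append(k)  # 新しく作成されたディレクトリの数を記録
--
--     return ans
-- ===== SOURCE B (Python) =====
-- def solve(paths: list[str]) -> list[int]:
--     # Flat set of already-seen directory prefixes (as component tuples)
--     # instead of a nested-dict trie.
--     seen = set()
--     ans = []
--     for path in paths:
--         k = 0
--         cur = ()
--         for comp in path.split("/"):
--             cur = cur + (comp,)
--             if cur not in seen:
--                 seen.add(cur)
--                 k += 1
--         ans.append(k)
--     return ans
-- ===== Notes on version B (the rewrite author's own statement) =====
-- stated objective: idiomatic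
-- what changed: Replaces the nested-dict trie with per-level descent and node allocation by a single flat set of already-seen prefix tuples, testing/adding each cumulative prefix of the split path.
import Mathlib
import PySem

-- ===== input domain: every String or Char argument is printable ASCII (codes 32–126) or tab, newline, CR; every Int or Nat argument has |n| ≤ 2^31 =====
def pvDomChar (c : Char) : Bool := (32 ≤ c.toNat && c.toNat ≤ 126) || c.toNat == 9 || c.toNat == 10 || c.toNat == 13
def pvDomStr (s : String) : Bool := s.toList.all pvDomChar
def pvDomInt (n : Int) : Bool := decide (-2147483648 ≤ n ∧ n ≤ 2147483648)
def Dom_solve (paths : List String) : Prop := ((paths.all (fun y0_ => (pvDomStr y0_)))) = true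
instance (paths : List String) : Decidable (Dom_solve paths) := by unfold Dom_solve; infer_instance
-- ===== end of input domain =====

-- B replaces A's nested-dict trie (descend + allocate per level) by one flat set of
-- already-seen prefix tuples (objective: idiomatic; not claimed faster).

-- ===== PORT A =====
-- The nested dict 'dic' is a tree of association nodes; the aliased in-place mutation of
-- the inner loop ('temp_dic' descends and creates nodes) is ported as the structural
-- recursion trieInsert that rebuilds along the descent path.
inductive PyTrie where
  | nil : PyTrie
  | cons : String → PyTrie → PyTrie → PyTrie
deriving DecidableEq, Repr

def trieLookup : PyTrie → String → Option PyTrie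
  | .nil, _ => none
  | .cons n c r, s => if n = s then some c else trieLookup r s

def trieUpdate : PyTrie → String → PyTrie → PyTrie
  | .nil, _, _ => .nil
  | .cons n c r, s, c' => if n = s then .cons n c' r else .cons n c (trieUpdate r s c')

def trieAdd : PyTrie → String → PyTrie → PyTrie
  | .nil, s, c' => .cons s c' .nil
  | .cons n c r, s, c' => .cons n c (trieAdd r s c')

def trieInsert : PyTrie → List String → PyTrie × Int
  | t, [] => (t, 0)
  | t, s :: ss =>
    match trieLookup t s with
    | some c => let r := trieInsert c ss; (trieUpdate t s r.1, r.2)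
    | none => let r := trieInsert .nil ss; (trieAdd t s r.1, r.2 + 1)

def solve (paths : List String) : List Int :=
  (paths.foldl
    (fun (st : PyTrie × List Int) path =>
      let r := trieInsert st.1 ((PySem.Str.split? path "/").getD [])
      (r.1, st.2 ++ [r.2]))
    (.nil, [])).2

-- ===== PORT B =====
def bInner (cs : List String) (acc : List String × PySem.Set (List String) × Int) :
    List String × PySem.Set (List String) × Int :=
  cs.foldl
    (fun acc comp =>
      let cur := acc.1 ++ [comp]
      if PySem.Set.contains acc.2.1 cur then (cur, acc.2.1, acc.2.2)
      else (cur, PySem.Set.add acc.2.1 cur, acc.2.2 + 1))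
    acc

def solve_alt (paths : List String) : List Int :=
  (paths.foldl
    (fun (st : PySem.Set (List String) × List Int) path =>
      let r := bInner ((PySem.Str.split? path "/").getD []) ([], st.1, 0)
      (r.2.1, st.2 ++ [r.2.2]))
    (PySem.Set.empty, [])).2

-- ===== PRECONDITION & SPEC =====
def Spec_solve (paths : List String) (out : List Int) : Prop := out = solve_alt paths
instance (paths : List String) (out : List Int) : Decidable (Spec_solve paths out) := by unfold Spec_solve; infer_instance

-- ===== CLAIM (what is proved, stated in full; the proofs are below) =====
def Claim_equal_solve : Prop := ∀ (paths : List String), Dom_solve paths → Spec_solve paths (solve paths)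

-- ===== LEMMAS AND PROOFS =====

-- p is a (path to a) node of the trie
def isNode : PyTrie → List String → Bool
  | _, [] => true
  | t, s :: ss =>
    match trieLookup t s with
    | some c => isNode c ss
    | none => false

-- the nonempty prefixes of a component list
def preList : List String → List (List String)
  | [] => []
  | s :: ss => [s] :: (preList ss).map (s :: ·)

theorem preList_ne_nil {cs p : List String} (h : p ∈ preList cs) : p ≠ [] := by
  induction cs generalizing p with
  | nil => simp [preList] at h
  | cons s ss ih =>
    simp only [preList, List.mem_cons, List.mem_map] at h
    rcases h with rfl | ⟨q, _, rfl⟩ <;> simp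

theorem preList_length (cs : List String) : (preList cs).length = cs.length := by
  induction cs with
  | nil => rfl
  | cons s ss ih => simp [preList, ih]

theorem lookup_update {t : PyTrie} {s : String} {c0 : PyTrie} (c' : PyTrie) (x : String)
    (h : trieLookup t s = some c0) :
    trieLookup (trieUpdate t s c') x = if x = s then some c' else trieLookup t x := by
  induction t with
  | nil => simp [trieLookup] at h
  | cons n c r ihc ihr =>
    by_cases hn : n = s
    · subst hn
      have hu : trieUpdate (PyTrie.cons n c r) n c' = PyTrie.cons n c' r := by
        simp [trieUpdate]
      rw [hu]
      by_cases hx : n = x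
      · subst hx; simp [trieLookup]
      · simp only [trieLookup, if_neg hx]
        rw [if_neg (fun h' : x = n => hx h'.symm)]
    · simp only [trieLookup, if_neg hn] at h
      simp only [trieUpdate, if_neg hn, trieLookup, ihr h]
      by_cases hx : n = x
      · subst hx
        simp [fun h' : n = s => hn h']
      · simp [hx]

theorem lookup_add {t : PyTrie} {s : String} (c' : PyTrie) (x : String)
    (h : trieLookup t s = none) :
    trieLookup (trieAdd t s c') x = if x = s then some c' else trieLookup t x := by
  induction t with
  | nil =>
    simp only [trieAdd, trieLookup]
    by_cases hx : s = x
    · subst hx; simp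
    · simp only [if_neg hx, if_neg (fun h' : x = s => hx h'.symm)]
  | cons n c r ihc ihr =>
    simp only [trieLookup] at h
    by_cases hn : n = s
    · simp [hn] at h
    · simp only [if_neg hn] at h
      simp only [trieAdd, trieLookup, ihr h]
      by_cases hx : n = x
      · subst hx; simp [fun h' : n = s => hn h']
      · simp [hx]

theorem isNode_nil (p : List String) : isNode .nil p = decide (p = []) := by
  cases p <;> simp [isNode, trieLookup]

theorem mem_preList_cons (x s : String) (q ss : List String) :
    (x :: q ∈ preList (s :: ss)) ↔ x = s ∧ (q = [] ∨ q ∈ preList ss) := by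
  simp only [preList, List.mem_cons, List.mem_map]
  constructor
  · rintro (he | ⟨a, ha, he⟩)
    · injection he with h1 h2; exact ⟨h1, Or.inl h2⟩
    · injection he with h1 h2; exact ⟨h1.symm, Or.inr (h2 ▸ ha)⟩
  · rintro ⟨rfl, rfl | hq⟩
    · exact Or.inl rfl
    · exact Or.inr ⟨q, hq, rfl⟩

theorem insert_node (cs : List String) (t : PyTrie) (p : List String) :
    isNode (trieInsert t cs).1 p = (isNode t p || decide (p ∈ preList cs)) := by
  induction cs generalizing t p with
  | nil => simp [trieInsert, preList]
  | cons s ss ih =>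
    cases p with
    | nil => simp [isNode]
    | cons x q =>
      simp only [trieInsert]
      cases hl : trieLookup t s with
      | some c =>
        have hL := lookup_update (t := t) (s := s) (trieInsert c ss).1 x hl
        simp only [isNode, hL]
        by_cases hx : x = s
        · subst hx
          simp only [hl, mem_preList_cons]
          by_cases hq : q = []
          · subst hq; simp [isNode]
          · simp [hq, ih]
        · rw [if_neg hx]
          simp [mem_preList_cons, hx]
      | none =>
        have hL := lookup_add (t := t) (s := s) (trieInsert .nil ss).1 x hl
        simp only [isNode, hL]
        by_cases hx : x = s
        · subst hx
          simp only [hl, mem_preList_cons]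
          by_cases hq : q = []
          · subst hq; simp [isNode]
          · simp [hq, ih, isNode_nil]
        · rw [if_neg hx]
          simp [mem_preList_cons, hx]

theorem insert_nil_count (cs : List String) : (trieInsert .nil cs).2 = (cs.length : Int) := by
  induction cs with
  | nil => simp [trieInsert]
  | cons s ss ih =>
    simp only [trieInsert, trieLookup, ih, List.length_cons]
    push_cast
    ring

theorem insert_count (cs : List String) (t : PyTrie) :
    (trieInsert t cs).2 = (((preList cs).countP (fun p => !isNode t p) : Nat) : Int) := by
  induction cs generalizing t with
  | nil => simp [trieInsert, preList]
  | cons s ss ih =>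
    simp only [trieInsert]
    cases hl : trieLookup t s with
    | some c =>
      have hs : isNode t [s] = true := by simp [isNode, hl]
      simp only [preList, List.countP_cons, List.countP_map, hs, Bool.not_true, ih]
      have : ((fun p => !isNode t p) ∘ (s :: ·)) = fun p => !isNode c p := by
        funext p; simp [isNode, hl]
      simp [this]
    | none =>
      have hs : isNode t [s] = false := by simp [isNode, hl]
      have hall : ∀ p ∈ preList ss, (!isNode t (s :: p)) = true := by
        intro p _; simp [isNode, hl]
      simp only [preList, List.countP_cons, List.countP_map, hs, Bool.not_false, insert_nil_count]
      have : ((preList ss).countP ((fun p => !isNode t p) ∘ (s :: ·))) = (preList ss).length := by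
        rw [List.countP_eq_length]
        intro p hp; exact hall p hp
      rw [this, preList_length]
      push_cast
      omega

theorem contains_add_ne {S : PySem.Set (List String)} {x y : List String} (h : y ≠ x) :
    PySem.Set.contains (PySem.Set.add S x) y = PySem.Set.contains S y := by
  rw [Bool.eq_iff_iff]
  simp only [PySem.Set.contains_iff, PySem.Set.mem_add]
  constructor
  · rintro (hm | rfl)
    · exact hm
    · exact absurd rfl h
  · exact Or.inl

theorem bInner_cons (c : String) (cs : List String)
    (acc : List String × PySem.Set (List String) × Int) :
    bInner (c :: cs) acc
      = bInner cs
          (if PySem.Set.contains acc.2.1 (acc.1 ++ [c])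
           then (acc.1 ++ [c], acc.2.1, acc.2.2)
           else (acc.1 ++ [c], PySem.Set.add acc.2.1 (acc.1 ++ [c]), acc.2.2 + 1)) := by
  simp only [bInner, List.foldl_cons]

theorem bInner_mem (cs : List String) (cur : List String) (S : PySem.Set (List String))
    (k : Int) (x : List String) :
    (x ∈ (bInner cs (cur, S, k)).2.1) ↔ x ∈ S ∨ ∃ p ∈ preList cs, x = cur ++ p := by
  induction cs generalizing cur S k with
  | nil => simp [bInner, preList]
  | cons c ss ih =>
    rw [bInner_cons]
    have hpre : ∀ y, (∃ p ∈ preList (c :: ss), y = cur ++ p)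
        ↔ y = cur ++ [c] ∨ ∃ p ∈ preList ss, y = (cur ++ [c]) ++ p := by
      intro y
      simp only [preList, List.mem_cons, List.mem_map]
      constructor
      · rintro ⟨p, hp | ⟨q, hq, rfl⟩, rfl⟩
        · exact Or.inl (by simp [hp])
        · exact Or.inr ⟨q, hq, by simp⟩
      · rintro (rfl | ⟨q, hq, rfl⟩)
        · exact ⟨[c], Or.inl rfl, rfl⟩
        · exact ⟨c :: q, Or.inr ⟨q, hq, rfl⟩, by simp⟩
    by_cases hc : PySem.Set.contains S (cur ++ [c]) = true
    · simp only [hc, if_pos, ih, hpre]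
      have hm : cur ++ [c] ∈ S := (PySem.Set.contains_iff ..).mp hc
      constructor
      · rintro (h | h) <;> [exact Or.inl h; exact Or.inr (Or.inr h)]
      · rintro (h | rfl | h)
        · exact Or.inl h
        · exact Or.inl hm
        · exact Or.inr h
    · simp only [if_neg hc, ih, hpre, PySem.Set.mem_add]
      tauto

theorem bInner_count (cs : List String) (cur : List String) (S : PySem.Set (List String))
    (k : Int) :
    (bInner cs (cur, S, k)).2.2
      = k + (((preList cs).countP (fun p => !(PySem.Set.contains S (cur ++ p))) : Nat) : Int) := by
  induction cs generalizing cur S k with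
  | nil => simp [bInner, preList]
  | cons c ss ih =>
    rw [bInner_cons]
    by_cases hc : PySem.Set.contains S (cur ++ [c]) = true
    · simp only [hc, if_pos, ih]
      simp only [preList, List.countP_cons, List.countP_map, hc, Bool.not_true]
      have hfun : ((fun p => !PySem.Set.contains S (cur ++ p)) ∘ (c :: ·))
          = fun p => !PySem.Set.contains S ((cur ++ [c]) ++ p) := by
        funext p
        simp only [Function.comp_apply]
        rw [List.append_cons]
      rw [hfun]
      simp
    · simp only [if_neg hc, ih]
      rw [Bool.not_eq_true] at hc
      have heq : (preList ss).countP
            (fun p => !(PySem.Set.contains (PySem.Set.add S (cur ++ [c])) ((cur ++ [c]) ++ p)))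
          = (preList ss).countP ((fun p => !PySem.Set.contains S (cur ++ p)) ∘ (c :: ·)) := by
        apply List.countP_congr
        intro p hp
        have hne : (cur ++ [c]) ++ p ≠ cur ++ [c] := by simp [preList_ne_nil hp]
        have hap : cur ++ (c :: p) = (cur ++ [c]) ++ p := List.append_cons ..
        rw [contains_add_ne hne, Function.comp_apply, hap]
      rw [heq]
      simp only [preList, List.countP_cons, List.countP_map, hc, Bool.not_false, if_pos]
      push_cast
      ring

def TrieInv (t : PyTrie) (S : PySem.Set (List String)) : Prop :=
  ∀ p : List String, p ≠ [] → (isNode t p = true ↔ p ∈ S)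

theorem outer (paths : List String) (t : PyTrie) (S : PySem.Set (List String))
    (ans : List Int) (hI : TrieInv t S) :
    (paths.foldl
      (fun (st : PyTrie × List Int) path =>
        let r := trieInsert st.1 ((PySem.Str.split? path "/").getD [])
        (r.1, st.2 ++ [r.2])) (t, ans)).2
    = (paths.foldl
      (fun (st : PySem.Set (List String) × List Int) path =>
        let r := bInner ((PySem.Str.split? path "/").getD []) ([], st.1, 0)
        (r.2.1, st.2 ++ [r.2.2])) (S, ans)).2 := by
  induction paths generalizing t S ans with
  | nil => rfl
  | cons path rest ih =>
    simp only [List.foldl_cons]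
    set cs := (PySem.Str.split? path "/").getD [] with hcs
    -- the counts agree
    have hcount : (trieInsert t cs).2 = (bInner cs ([], S, 0)).2.2 := by
      rw [insert_count, bInner_count, zero_add]
      have hcp : (preList cs).countP (fun p => !isNode t p)
          = (preList cs).countP (fun p => !(PySem.Set.contains S ([] ++ p))) := by
        apply List.countP_congr
        intro p hp
        have hne := preList_ne_nil hp
        have hbool : isNode t p = PySem.Set.contains S p := by
          rw [Bool.eq_iff_iff, PySem.Set.contains_iff]
          exact hI p hne
        rw [List.nil_append, hbool]
      rw [hcp]
    -- the invariant is preserved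
    have hinv : TrieInv (trieInsert t cs).1 (bInner cs ([], S, 0)).2.1 := by
      intro p hp
      rw [insert_node, bInner_mem]
      have hmap : (∃ q ∈ preList cs, p = [] ++ q) ↔ p ∈ preList cs := by
        simp
      rw [hmap]
      simp only [Bool.or_eq_true, decide_eq_true_eq]
      constructor
      · rintro (h | h)
        · exact Or.inl ((hI p hp).mp h)
        · exact Or.inr h
      · rintro (h | h)
        · exact Or.inl ((hI p hp).mpr h)
        · exact Or.inr h
    rw [hcount]
    exact ih _ _ _ hinv

-- ===== VERDICT (by name: the statement is the Claim_ definition above) =====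
theorem solve_spec : Claim_equal_solve := by
  intro paths _
  unfold Spec_solve solve solve_alt
  exact outer paths .nil PySem.Set.empty []
    (by intro p hp; simp [isNode_nil, hp, PySem.Set.empty])
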